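-- pv_equiv track=rewrite | github.com/Soeren09/Sokoban | src/Sokobanther.py | translateCommand
-- ===== SOURCE A (Python) =====
-- def translateCommand(commands): # no predined
--     prev_is_upper = False
--     prev_command = 'N'
--     translated = ""
--     for i in range(len(commands)):
--         if ( ord(commands[i]) >= 65 and ord(commands[i]) <= 90 ):
--             if ( prev_is_upper and prev_command == commands[i] ): # upper and equal to last -> for consecutive uppers add 1
--                 translated += commands[i].lower()
--                 prev_is_upper = True
--                 prev_command = commands[i]
--             else: ## Upper not equal to last -> first upper add 2
--                 translated += commands[i].lower()
--                 translated += commands[i].lower()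
--                 prev_is_upper = True
--                 prev_command = commands[i]
--             # check if current is last push -> add x (reverse)
--             if ( i+1 < len(commands) and commands[i+1] != prev_command):
--                 translated += 'x'
--         else: # not upper
--             translated += commands[i]
--             prev_is_upper = False
--             prev_command = 'N'
--     return translated
-- ===== SOURCE B (Python) =====
-- def translateCommand(commands):
--     # Split into maximal runs of identical characters, then emit per run:
--     # an uppercase run of length n becomes n+1 lowercase copies plus a
--     # trailing 'x' unless the run ends the string; other runs pass through.
--     runs = []
--     i = 0
--     n = len(commands)
--     while i < n:
--         j = i + 1
--         while j < n and commands[j] == commands[i]: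
--             j += 1
--         runs.append((commands[i], j - i))
--         i = j
--     parts = []
--     for k, (c, cnt) in enumerate(runs):
--         if 'A' <= c <= 'Z':
--             parts.append(chr(ord(c) + 32) * (cnt + 1))
--             if k + 1 < len(runs):
--                 parts.append('x')
--         else:
--             parts.append(c * cnt)
--     return "".join(parts)
-- ===== Notes on version B (the rewrite author's own statement) =====
-- stated objective: simpler
-- what changed: Replaces A's stateful char-by-char scan (prev_is_upper/prev_command flags with an inline lookahead) by a run-length decomposition: split the string into maximal runs of identical characters, then emit each run in one step (uppercase run of length n -> n+1 lowercase copies plus 'x' unless it is the last run; other runs pass through).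
import Mathlib
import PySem

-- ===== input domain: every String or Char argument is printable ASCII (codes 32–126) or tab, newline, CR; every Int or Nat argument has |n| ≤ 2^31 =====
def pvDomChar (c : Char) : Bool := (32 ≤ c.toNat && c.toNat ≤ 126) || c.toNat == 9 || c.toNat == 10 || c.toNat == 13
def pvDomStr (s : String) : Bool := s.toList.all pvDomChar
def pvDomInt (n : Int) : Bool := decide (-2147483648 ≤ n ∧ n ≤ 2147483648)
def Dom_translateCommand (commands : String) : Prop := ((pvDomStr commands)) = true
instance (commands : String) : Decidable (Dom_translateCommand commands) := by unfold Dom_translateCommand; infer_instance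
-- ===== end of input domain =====

-- B replaces A's stateful char-by-char scan (prev_is_upper/prev_command flags) by a
-- run-length decomposition: split into maximal runs of equal chars, then emit per run
-- (objective: simpler decomposition, not claimed faster).

-- ===== PORT A =====
-- Python str.lower on a single char; exact on ASCII (in A it is only applied to chars with 65 ≤ ord ≤ 90)
def pyLowerChar (c : Char) : Char :=
  if 65 ≤ c.toNat ∧ c.toNat ≤ 90 then Char.ofNat (c.toNat + 32) else c

-- `if i+1 < len(commands) and commands[i+1] != prev_command: translated += 'x'` (prev_command = c here)
def xIfA (c : Char) (rest : List Char) : List Char :=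
  match rest.head? with
  | some nc => if nc ≠ c then ['x'] else []
  | none => []

-- A's loop: state (prev_is_upper, prev_command, translated); translated kept as List Char
def goA : List Char → Bool → Char → List Char → List Char
  | [], _, _, tr => tr
  | c :: rest, prevUp, prevCmd, tr =>
    if 65 ≤ c.toNat ∧ c.toNat ≤ 90 then
      goA rest true c
        ((if prevUp && (prevCmd == c) then tr ++ [pyLowerChar c]
          else tr ++ [pyLowerChar c, pyLowerChar c]) ++ xIfA c rest)
    else
      goA rest false 'N' (tr ++ [c])

def translateCommand (commands : String) : String :=
  String.ofList (goA commands.toList false 'N' [])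

-- ===== PORT B =====
-- the run-building while loops of Source B: inner while = maximal prefix of chars equal to commands[i]
def runsB : List Char → List (Char × Nat)
  | [] => []
  | c :: rest =>
    (c, (rest.takeWhile (fun d => d == c)).length + 1) ::
      runsB (rest.dropWhile (fun d => d == c))
  termination_by l => l.length
  decreasing_by
    simp only [List.length_cons]
    exact Nat.lt_succ_of_le (List.length_dropWhile_le _ _)

-- Source B's emission loop; `k + 1 < len(runs)` ↔ the remaining run list is nonempty
def emitB : List (Char × Nat) → List Char
  | [] => []
  | (c, cnt) :: rest =>
    (if 65 ≤ c.toNat ∧ c.toNat ≤ 90 then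
       List.replicate (cnt + 1) (Char.ofNat (c.toNat + 32)) ++
         (if rest ≠ [] then ['x'] else [])
     else List.replicate cnt c) ++ emitB rest

def translateCommand_alt (commands : String) : String :=
  String.ofList (emitB (runsB commands.toList))

-- ===== PRECONDITION & SPEC =====
def Spec_translateCommand (commands : String) (out : String) : Prop := out = translateCommand_alt commands
instance (commands : String) (out : String) : Decidable (Spec_translateCommand commands out) := by unfold Spec_translateCommand; infer_instance

-- ===== CLAIM (what is proved, stated in full; the proofs are below) =====
def Claim_equal_translateCommand : Prop := ∀ (commands : String), Dom_translateCommand commands → Spec_translateCommand commands (translateCommand commands)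

-- ===== LEMMAS AND PROOFS =====

-- what A's loop produces from state (true, c) on the remaining input l
def gEmit (c : Char) : List Char → List Char
  | [] => []
  | d :: rest =>
    if d == c then Char.ofNat (c.toNat + 32) :: (xIfA c rest ++ gEmit c rest)
    else emitB (runsB (d :: rest))

theorem runsB_nil_iff (l : List Char) : runsB l = [] ↔ l = [] := by
  cases l with
  | nil => simp [runsB]
  | cons c rest => simp [runsB]

theorem gEmit_char (c : Char) (l : List Char) :
    gEmit c l =
      List.replicate (l.takeWhile (fun d => d == c)).length (Char.ofNat (c.toNat + 32)) ++
        ((if (l.takeWhile (fun d => d == c)) ≠ [] ∧ (l.dropWhile (fun d => d == c)) ≠ [] then ['x'] else []) ++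
          emitB (runsB (l.dropWhile (fun d => d == c)))) := by
  induction l with
  | nil => simp [gEmit, runsB, emitB]
  | cons d rest ih =>
    by_cases hd : d = c
    · subst hd
      simp only [gEmit, beq_self_eq_true, if_true, List.takeWhile_cons, List.dropWhile_cons, ih]
      cases rest with
      | nil => simp [xIfA]
      | cons e rest2 =>
        by_cases he : e = d
        · subst he
          simp [xIfA, List.replicate_succ]
        · have he' : (e == d) = false := by simp [he]
          simp [xIfA, he, he', List.replicate_succ]
    · have hd' : (d == c) = false := by simp [hd]
      simp [gEmit, hd']

-- unfolding B's output on an uppercase-headed input into A's step shape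
theorem emitB_upper (c : Char) (rest : List Char) (h1 : 65 ≤ c.toNat) (h2 : c.toNat ≤ 90) :
    emitB (runsB (c :: rest)) =
      Char.ofNat (c.toNat + 32) :: Char.ofNat (c.toNat + 32) :: (xIfA c rest ++ gEmit c rest) := by
  rw [gEmit_char]
  simp only [runsB, emitB, if_pos (And.intro h1 h2)]
  cases rest with
  | nil => simp [xIfA, runsB, List.replicate_succ]
  | cons e rest2 =>
    by_cases he : e = c
    · subst he
      simp [xIfA, runsB_nil_iff, List.dropWhile_eq_nil_iff, List.replicate_succ]
    · have he' : (e == c) = false := by simp [he]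
      simp [xIfA, he, he', runsB_nil_iff, List.replicate_succ]

-- B's output on a non-uppercase-headed input peels one char
theorem emitB_lower (c : Char) (rest : List Char) (h : ¬ (65 ≤ c.toNat ∧ c.toNat ≤ 90)) :
    emitB (runsB (c :: rest)) = c :: emitB (runsB rest) := by
  cases rest with
  | nil => simp [runsB, emitB, if_neg h]
  | cons e rest2 =>
    by_cases he : e = c
    · subst he
      simp [runsB, emitB, if_neg h, List.replicate_succ]
    · have he' : (e == c) = false := by simp [he]
      simp [runsB, emitB, if_neg h, he']

theorem goA_main (l : List Char) :
    (∀ tr, goA l false 'N' tr = tr ++ emitB (runsB l)) ∧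
    (∀ c tr, 65 ≤ c.toNat → c.toNat ≤ 90 → goA l true c tr = tr ++ gEmit c l) := by
  induction l with
  | nil => simp [goA, runsB, emitB, gEmit]
  | cons c rest ih =>
    constructor
    · intro tr
      by_cases hu : 65 ≤ c.toNat ∧ c.toNat ≤ 90
      · rw [goA, if_pos hu]
        simp only [Bool.false_and]
        rw [ih.2 c _ hu.1 hu.2, emitB_upper c rest hu.1 hu.2]
        simp [pyLowerChar, if_pos hu]
      · rw [goA, if_neg hu, ih.1, emitB_lower c rest hu]
        simp
    · intro p tr hp1 hp2
      by_cases hu : 65 ≤ c.toNat ∧ c.toNat ≤ 90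
      · rw [goA, if_pos hu]
        by_cases hpc : p = c
        · subst hpc
          simp only [beq_self_eq_true, Bool.and_true]
          rw [ih.2 p _ hp1 hp2]
          simp [gEmit, pyLowerChar, if_pos hu]
        · have hpc' : (p == c) = false := by simp [hpc]
          have hcp : (c == p) = false := by simp [Ne.symm hpc]
          simp only [hpc', Bool.and_false, Bool.false_eq_true, if_false]
          rw [ih.2 c _ hu.1 hu.2]
          simp [gEmit, hcp, emitB_upper c rest hu.1 hu.2, pyLowerChar, if_pos hu]
      · rw [goA, if_neg hu, ih.1]
        have hcp : (c == p) = false := by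
          have hne : c ≠ p := fun h => hu (h ▸ ⟨hp1, hp2⟩)
          simp [hne]
        simp [gEmit, hcp, emitB_lower c rest hu]

-- ===== VERDICT (by name: the statement is the Claim_ definition above) =====
theorem translateCommand_spec : Claim_equal_translateCommand := by
  intro commands _
  unfold Spec_translateCommand translateCommand translateCommand_alt
  rw [(goA_main commands.toList).1 []]
  simp
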